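-- pv_equiv track=rewrite | github.com/evocrestco/api_exchange_core | api_exchange_core/processors/v2/output_handlers/service_bus_output.py | _is_valid_entity_name
-- ===== SOURCE A (Python) =====
-- def _is_valid_entity_name(entity_name: str) -> bool:
--     """
--     Validate Azure Service Bus entity name according to naming rules.
--
--     Rules:
--     - Must be 1-260 characters long
--     - Can contain letters, numbers, periods, hyphens, underscores, and forward slashes
--     - Cannot start or end with a slash
--     - Cannot contain consecutive slashes
--     """
--     if not entity_name or len(entity_name) < 1 or len(entity_name) > 260:
--         return False
--
--     if entity_name.startswith("/") or entity_name.endswith("/"):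
--         return False
--
--     if "//" in entity_name:
--         return False
--
--     # Check allowed characters
--     allowed_chars = set("abcdefghijklmnopqrstuvwxyzABCDEFGHIJKLMNOPQRSTUVWXYZ0123456789.-_/")
--     return all(c in allowed_chars for c in entity_name)
-- ===== SOURCE B (Python) =====
-- def _is_valid_entity_name(entity_name: str) -> bool:
--     if not entity_name:
--         return False
--     prev = "/"
--     n = 0
--     for c in entity_name:
--         n += 1
--         if n > 260:
--             return False
--         if not ((c.isalnum() and c.isascii()) or c in "._-/"):
--             return False
--         if c == "/" and prev == "/":
--             return False
--         prev = c
--     return prev != "/"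
-- ===== Notes on version B (the rewrite author's own statement) =====
-- stated objective: alternative
-- what changed: Replaces A's chain of whole-string guards (length check, startswith/endswith, consecutive-slash substring scan, then an all()-scan against a set) with one single-pass scan that carries the previous character and a counter, deciding every rule in one traversal.
import Mathlib
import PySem

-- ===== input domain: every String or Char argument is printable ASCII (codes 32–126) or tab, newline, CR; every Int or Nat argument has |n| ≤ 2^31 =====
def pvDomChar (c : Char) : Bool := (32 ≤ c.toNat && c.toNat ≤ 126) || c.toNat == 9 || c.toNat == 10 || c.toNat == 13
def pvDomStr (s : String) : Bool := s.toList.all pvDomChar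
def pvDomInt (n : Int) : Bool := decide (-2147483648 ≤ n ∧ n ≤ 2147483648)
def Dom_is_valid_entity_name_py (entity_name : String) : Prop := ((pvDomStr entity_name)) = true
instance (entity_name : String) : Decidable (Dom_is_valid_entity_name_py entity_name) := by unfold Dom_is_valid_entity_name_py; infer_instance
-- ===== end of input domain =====

-- B replaces A's chain of whole-string guards with one single-pass scan carrying the previous character; alternative decomposition, same cost.

-- ===== PORT A =====
def pvAllowedA : PySem.Set Char :=
  PySem.Set.ofList "abcdefghijklmnopqrstuvwxyzABCDEFGHIJKLMNOPQRSTUVWXYZ0123456789.-_/".toList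

def is_valid_entity_name_py (entity_name : String) : Bool :=
  if entity_name.toList.isEmpty || PySem.Str.len entity_name < 1 || PySem.Str.len entity_name > 260 then false
  else if PySem.Str.startswith entity_name "/" || PySem.Str.endswith entity_name "/" then false
  else if PySem.Str.isIn "//" entity_name then false
  else entity_name.toList.all (fun c => PySem.Set.contains pvAllowedA c)

-- ===== PORT B =====
def pvAllowedB (c : Char) : Bool :=
  (PySem.Chars.isalnum c && c.toNat < 128) || (c == '.' || c == '_' || c == '-' || c == '/')

def pvAltLoop : Char → Nat → List Char → Bool
  | prev, _, [] => prev != '/'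
  | prev, n, c :: cs =>
    if n + 1 > 260 then false
    else if !pvAllowedB c then false
    else if c == '/' && prev == '/' then false
    else pvAltLoop c (n + 1) cs

def is_valid_entity_name_py_alt (entity_name : String) : Bool :=
  if entity_name.toList.isEmpty then false
  else pvAltLoop '/' 0 entity_name.toList

-- ===== PRECONDITION & SPEC =====
def Spec_is_valid_entity_name_py (entity_name : String) (out : Bool) : Prop := out = is_valid_entity_name_py_alt entity_name
instance (entity_name : String) (out : Bool) : Decidable (Spec_is_valid_entity_name_py entity_name out) := by unfold Spec_is_valid_entity_name_py; infer_instance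

-- ===== CLAIM (what is proved, stated in full; the proofs are below) =====
def Claim_equal_is_valid_entity_name_py : Prop := ∀ (entity_name : String), Dom_is_valid_entity_name_py entity_name → Spec_is_valid_entity_name_py entity_name (is_valid_entity_name_py entity_name)

-- ===== LEMMAS AND PROOFS =====

-- no-consecutive-slashes checker (proof helper): pvPairsOk prev l = no "//" inside prev::l
def pvPairsOk : Char → List Char → Bool
  | _, [] => true
  | prev, c :: cs => !(c == '/' && prev == '/') && pvPairsOk c cs

set_option maxRecDepth 1000000 in
theorem pvAllowed_agree (c : Char) (hc : pvDomChar c = true) :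
    PySem.Set.contains pvAllowedA c = pvAllowedB c := by
  have hlt : c.toNat < 127 := by
    simp [pvDomChar] at hc
    omega
  have key : ((List.range 127).all fun n =>
      PySem.Set.contains pvAllowedA (Char.ofNat n) == pvAllowedB (Char.ofNat n)) = true := by
    decide
  have h2 := (List.all_eq_true.mp key) c.toNat (List.mem_range.mpr hlt)
  have h3 := beq_iff_eq.mp h2
  rwa [Char.ofNat_toNat] at h3

theorem pvAll_agree (l : List Char) (h : l.all pvDomChar = true) :
    (l.all fun c => PySem.Set.contains pvAllowedA c) = l.all pvAllowedB := by
  induction l with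
  | nil => simp
  | cons c cs ih =>
    simp only [List.all_cons] at h ⊢
    rcases Bool.and_eq_true_iff.mp h with ⟨h1, h2⟩
    rw [pvAllowed_agree c h1, ih h2]

theorem pvLoop_eq (l : List Char) : ∀ (prev : Char) (n : Nat), n ≤ 260 →
    pvAltLoop prev n l =
      (decide (n + l.length ≤ 260) && (l.all pvAllowedB &&
        (pvPairsOk prev l && (l.getLastD prev != '/')))) := by
  induction l with
  | nil =>
    intro prev n hn
    simp [pvAltLoop, pvPairsOk, hn]
  | cons c cs ih =>
    intro prev n hn
    rw [show n + (c :: cs).length = n + 1 + cs.length from by simp; omega]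
    by_cases hbig : n + 1 > 260
    · have hd : decide (n + 1 + cs.length ≤ 260) = false := by simp; omega
      simp [pvAltLoop, hbig, hd]
    · have hn1 : n + 1 ≤ 260 := by omega
      by_cases hac : pvAllowedB c = true
      · by_cases hsl : (c == '/' && prev == '/') = true
        · simp [pvAltLoop, hbig, hac, hsl, pvPairsOk]
        · have hsl' : (c == '/' && prev == '/') = false := by
            cases h : (c == '/' && prev == '/')
            · rfl
            · exact absurd h hsl
          have hstep : pvAltLoop prev n (c :: cs) = pvAltLoop c (n + 1) cs := by
            simp [pvAltLoop, hbig, hac, hsl']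
          have hlast : (c :: cs).getLast?.getD prev = cs.getLast?.getD c := by
            cases cs with
            | nil => simp
            | cons h t =>
              rw [List.getLast?_cons_cons]
              cases e : (h :: t).getLast? with
              | none => simp [List.getLast?_eq_none_iff] at e
              | some a => rfl
          rw [hstep, ih c (n + 1) hn1]
          simp [pvPairsOk, hac, hsl', hlast]
      · have hac' : pvAllowedB c = false := by
          cases h : pvAllowedB c
          · rfl
          · exact absurd h hac
        simp [pvAltLoop, hbig, hac', pvPairsOk]

theorem pvPairsOk_iff (l : List Char) : ∀ prev : Char,
    pvPairsOk prev l = !decide (['/', '/'] <:+: prev :: l) := by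
  induction l with
  | nil =>
    intro prev
    simp [pvPairsOk, List.infix_cons_iff, List.cons_prefix_cons]
  | cons c cs ih =>
    intro prev
    simp only [pvPairsOk, ih c]
    rw [Bool.eq_iff_iff]
    by_cases hc : c = '/' <;> by_cases hp2 : prev = '/'
    · simp [hc, hp2, List.infix_cons_iff, List.cons_prefix_cons]
    · have hp2' : ¬('/' = prev) := fun h => hp2 h.symm
      simp [hc, hp2', List.infix_cons_iff, List.cons_prefix_cons]
      tauto
    · have hcs : ¬('/' = c) := fun h => hc h.symm
      simp [hcs, hp2, List.infix_cons_iff, List.cons_prefix_cons]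
      tauto
    · have hcs : ¬('/' = c) := fun h => hc h.symm
      have hp2' : ¬('/' = prev) := fun h => hp2 h.symm
      simp [hcs, hp2', List.infix_cons_iff, List.cons_prefix_cons]
      tauto

theorem pvLastD_ne (l : List Char) (h : l ≠ []) :
    (l.getLastD '/' != '/') = !decide (['/'] <:+ l) := by
  rcases l.eq_nil_or_concat with rfl | ⟨t, a, rfl⟩
  · exact absurd rfl h
  · have hsuf : (['/'] <:+ t ++ [a]) ↔ a = '/' := by
      constructor
      · rintro ⟨u, hu⟩
        have := congrArg List.getLast? hu
        simpa [List.getLast?_concat] using this.symm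
      · rintro rfl; exact ⟨t, rfl⟩
    rw [Bool.eq_iff_iff]
    simp [hsuf, bne]

theorem pvLists_eq (l : List Char) (hdom : l.all pvDomChar = true) (hne : l ≠ []) :
    (if (l.length : Int) < 1 ∨ (l.length : Int) > 260 then false
     else if PySem.Chars.startswith l ['/'] || PySem.Chars.endswith l ['/'] then false
     else if PySem.Chars.isIn ['/', '/'] l then false
     else l.all fun c => PySem.Set.contains pvAllowedA c) = pvAltLoop '/' 0 l := by
  rw [pvLoop_eq l '/' 0 (by norm_num), pvPairsOk_iff, pvLastD_ne l hne,
    pvAll_agree l hdom]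
  have hsw : PySem.Chars.startswith l ['/'] = decide (['/'] <+: l) := by
    rw [Bool.eq_iff_iff]; simp [PySem.Chars.startswith_iff]
  have hew : PySem.Chars.endswith l ['/'] = decide (['/'] <:+ l) := by
    rw [Bool.eq_iff_iff]; simp [PySem.Chars.endswith_iff]
  have hin : PySem.Chars.isIn ['/', '/'] l = decide (['/', '/'] <:+: l) := by
    rw [Bool.eq_iff_iff]; simp [PySem.Chars.isIn_iff_infix]
  rw [hsw, hew, hin]
  have hpos : 1 ≤ l.length := List.length_pos_iff.mpr hne
  have hinfix : (['/', '/'] <:+: '/' :: l) ↔ (['/'] <+: l ∨ ['/', '/'] <:+: l) := by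
    simp [List.infix_cons_iff, List.cons_prefix_cons]
  have hc1 : (((l.length : Int) < 1 ∨ (l.length : Int) > 260)) ↔ ¬ (l.length ≤ 260) := by
    omega
  by_cases hlen : l.length ≤ 260
  · rw [if_neg (fun h => (hc1.mp h) hlen)]
    have h2 : decide (0 + l.length ≤ 260) = true := by simp [hlen]
    rw [h2, Bool.true_and]
    by_cases hp : ['/'] <+: l <;> by_cases hs : ['/'] <:+ l <;>
      by_cases hi : ['/', '/'] <:+: l <;>
        simp [hp, hs, hi, hinfix, Bool.and_comm]
  · rw [if_pos (hc1.mpr hlen)]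
    have h2 : decide (0 + l.length ≤ 260) = false := by simp; omega
    rw [h2]
    simp

-- ===== VERDICT (by name: the statement is the Claim_ definition above) =====
theorem is_valid_entity_name_py_spec : Claim_equal_is_valid_entity_name_py := by
  intro s hdom
  unfold Spec_is_valid_entity_name_py is_valid_entity_name_py is_valid_entity_name_py_alt
  by_cases hE : s.toList.isEmpty = true
  · simp [hE]
  · have hne : s.toList ≠ [] := by simpa [List.isEmpty_iff] using hE
    have hdom' : s.toList.all pvDomChar = true := hdom
    rw [← pvLists_eq s.toList hdom' hne]
    have hT : ("/" : String).toList = ['/'] := rfl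
    have hT2 : ("//" : String).toList = ['/', '/'] := rfl
    simp [hE, PySem.Str.len, PySem.Str.startswith, PySem.Str.endswith, PySem.Str.isIn,
      hT, hT2]
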